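-- pv_equiv track=rewrite | github.com/Shakhemir/pyrhon_dz_04 | dz01_spisok.py | new_list
-- ===== SOURCE A (Python) =====
-- def new_list(lst):
--     result = [lst[0]]
--     count = 0
--     for i in range(1, len(lst)):
--         if lst[i] > result[count]:
--             result.append(lst[i])
--             count += 1
--     return result
-- ===== SOURCE B (Python) =====
-- def new_list(lst):
--     # two-pass: precompute running prefix maxima, then filter against the shifted table
--     running = [lst[0]]
--     for x in lst[1:]:
--         running.append(x if x > running[-1] else running[-1])
--     return [lst[0]] + [x for x, m in zip(lst[1:], running) if x > m]
-- ===== Notes on version B (the rewrite author's own statement) =====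
-- stated objective: alternative
-- what changed: B precomputes the full prefix-maximum table in one pass and then selects the strict left-to-right maxima in a separate zip-filter pass, instead of A's single scan that threads a tail index 'count' into the growing result list.
import Mathlib
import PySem

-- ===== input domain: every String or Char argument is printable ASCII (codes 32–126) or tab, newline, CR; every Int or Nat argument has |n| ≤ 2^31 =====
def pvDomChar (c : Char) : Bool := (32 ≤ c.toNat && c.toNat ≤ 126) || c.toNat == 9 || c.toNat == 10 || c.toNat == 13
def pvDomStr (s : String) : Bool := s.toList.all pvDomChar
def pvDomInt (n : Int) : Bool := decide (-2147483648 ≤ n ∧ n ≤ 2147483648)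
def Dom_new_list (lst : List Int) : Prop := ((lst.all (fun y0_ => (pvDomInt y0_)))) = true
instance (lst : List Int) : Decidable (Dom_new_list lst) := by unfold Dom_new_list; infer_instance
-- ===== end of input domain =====

-- B precomputes a prefix-maximum table, then filters in a second pass; A scans once threading a
-- tail index into the growing result. Both raise IndexError on [], so Pre_ excludes the empty list.

-- ===== PORT A =====
-- result = [lst[0]]; count = 0; for i in range(1, len(lst)): if lst[i] > result[count]: append, count += 1
def new_list (lst : List Int) : List Int :=
  match lst with
  | [] => []   -- unreachable: Pre_new_list requires lst ≠ [] (Python raises IndexError reading the first element)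
  | h :: _ =>
    ((PySem.List.pyRange 1 (lst.length : Int) 1).foldl
      (fun (st : List Int × Int) i =>
        (fun (st : List Int × Int) (x : Int) =>
          if x > PySem.List.pyGetD st.1 st.2 0 then (st.1 ++ [x], st.2 + 1) else st)
        st (PySem.List.pyGetD lst i 0))
      ([h], 0)).1

-- ===== PORT B =====
def new_list_alt (lst : List Int) : List Int :=
  match lst with
  | [] => []   -- unreachable: Pre_new_list requires lst ≠ [] (Python raises IndexError reading the first element)
  | h :: _ =>
    let running : List Int :=
      (PySem.List.slice lst (some 1) none).foldl
        (fun acc x =>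
          acc ++ [if x > PySem.List.pyGetD acc (-1) 0 then x else PySem.List.pyGetD acc (-1) 0])
        [h]
    h :: ((PySem.List.slice lst (some 1) none).zip running).filterMap
      (fun p => if p.1 > p.2 then some p.1 else none)

-- ===== PRECONDITION & SPEC =====
-- Pre_ excludes only the empty list, on which A (and B) raise IndexError reading the first element.
def Pre_new_list (lst : List Int) : Prop := lst ≠ []
instance (lst : List Int) : Decidable (Pre_new_list lst) := by unfold Pre_new_list; infer_instance
def pvWitness_new_list : List Int := [1, 3, 2]

def Spec_new_list (lst : List Int) (out : List Int) : Prop := out = new_list_alt lst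
instance (lst : List Int) (out : List Int) : Decidable (Spec_new_list lst out) := by unfold Spec_new_list; infer_instance

-- ===== CLAIM (what is proved, stated in full; the proofs are below) =====
def Claim_equal_new_list : Prop := ∀ (lst : List Int), Dom_new_list lst → Pre_new_list lst → Spec_new_list lst (new_list lst)

-- ===== LEMMAS AND PROOFS =====

-- the strict left-to-right maxima of t above a running bound m
def smax (m : Int) : List Int → List Int
  | [] => []
  | x :: xs => if x > m then x :: smax x xs else smax m xs

-- the prefix-maximum table of t with seed m
def pmax (m : Int) : List Int → List Int
  | [] => []
  | x :: xs => (if x > m then x else m) :: pmax (if x > m then x else m) xs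

lemma pyGetD_last (r : List Int) (m : Int) (h : r.getLast? = some m) :
    PySem.List.pyGetD r (-1) 0 = m := by
  have hr : r ≠ [] := by rintro rfl; simp at h
  have h1 : 1 ≤ r.length := List.length_pos_iff.mpr hr
  simp only [PySem.List.pyGetD, PySem.List.pyGet?, PySem.List.pyIdx?, Int.reduceNeg, Int.neg_nonneg,
    Int.reduceLE, ↓reduceIte, neg_le_neg_iff, Nat.one_le_cast, neg_neg, Int.toNat_one]
  rw [if_pos h1]
  simp only [Option.bind_some, ← List.getLast?_eq_getElem?, h, Option.getD_some]

lemma pyGetD_len_sub_one (r : List Int) (m : Int) (h : r.getLast? = some m) :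
    PySem.List.pyGetD r ((r.length : Int) - 1) 0 = m := by
  have hr : r ≠ [] := by rintro rfl; simp at h
  have h1 : 0 < r.length := List.length_pos_iff.mpr hr
  simp only [PySem.List.pyGetD, PySem.List.pyGet?, PySem.List.pyIdx?,
    sub_lt_self_iff, zero_lt_one, ↓reduceIte, Int.pred_toNat, Int.toNat_natCast,
    Order.le_sub_one_iff, neg_lt_self_iff, Int.natCast_pos, neg_sub, Int.toNat_sub', Int.toNat_one]
  rw [if_pos h1]
  simp only [Option.bind_some, ← List.getLast?_eq_getElem?, h, Option.getD_some]

-- invariant of A's scan: result holds the maxima so far, count indexes its last element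
lemma A_fold (t : List Int) : ∀ (r : List Int) (m c : Int), r.getLast? = some m →
    c = (r.length : Int) - 1 →
    (t.foldl
      (fun (st : List Int × Int) (x : Int) =>
        if x > PySem.List.pyGetD st.1 st.2 0 then (st.1 ++ [x], st.2 + 1) else st)
      (r, c)).1 = r ++ smax m t := by
  induction t with
  | nil => intro r m c h hc; simp [smax]
  | cons x xs ih =>
    intro r m c h hc
    simp only [List.foldl_cons, hc, pyGetD_len_sub_one r m h, smax]
    by_cases hx : x > m
    · rw [if_pos hx, if_pos hx]
      rw [ih (r ++ [x]) x ((r.length : Int) - 1 + 1) List.getLast?_concat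
        (by simp)]
      simp
    · rw [if_neg hx, if_neg hx]
      exact ih r m _ h rfl

-- invariant of B's first pass: the accumulator is the prefix-maximum table so far
lemma B_run (t : List Int) : ∀ (r : List Int) (m : Int), r.getLast? = some m →
    t.foldl
      (fun acc x =>
        acc ++ [if x > PySem.List.pyGetD acc (-1) 0 then x else PySem.List.pyGetD acc (-1) 0])
      r = r ++ pmax m t := by
  induction t with
  | nil => intro r m h; simp [pmax]
  | cons x xs ih =>
    intro r m h
    simp only [List.foldl_cons, pyGetD_last r m h, pmax]
    rw [ih (r ++ [if x > m then x else m]) (if x > m then x else m) List.getLast?_concat]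
    simp

-- B's second pass: filtering each element against the preceding prefix maximum = strict maxima
lemma B_zip (t : List Int) : ∀ (m : Int),
    (t.zip (m :: pmax m t)).filterMap (fun p => if p.1 > p.2 then some p.1 else none)
      = smax m t := by
  induction t with
  | nil => intro m; simp [smax]
  | cons x xs ih =>
    intro m
    simp only [pmax, List.zip_cons_cons, List.filterMap_cons, smax]
    by_cases hx : x > m
    · simp only [if_pos hx]
      rw [ih x]
    · simp only [if_neg hx]
      rw [ih m]

-- ===== VERDICT (by name: the statement is the Claim_ definition above) =====
theorem new_list_spec : Claim_equal_new_list := by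
  intro lst _ hpre
  unfold Spec_new_list
  match lst with
  | [] => exact absurd rfl hpre
  | h :: t =>
    show new_list (h :: t) = new_list_alt (h :: t)
    unfold new_list new_list_alt
    simp only [PySem.List.slice_from_one, List.tail_cons]
    rw [PySem.List.foldl_pyRange_pyGetD' (h :: t) 0
          (fun (st : List Int × Int) (x : Int) =>
            if x > PySem.List.pyGetD st.1 st.2 0 then (st.1 ++ [x], st.2 + 1) else st)
          ([h], 0) (by omega : (0:Int) ≤ 1)]
    simp only [Int.toNat_one, List.drop_succ_cons, List.drop_zero]
    rw [A_fold t [h] h 0 (by simp) (by simp)]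
    rw [B_run t [h] h (by simp)]
    simp only [List.singleton_append]
    rw [B_zip t h]
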